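-- pv_equiv track=rewrite | github.com/Olegas/advent-of-code-2021 | day12.py | part2
-- ===== SOURCE A (Python) =====
-- from collections import Counter
--
-- def part2(node, path):
--     if node == 'start':
--         return False
--     if node == 'end':
--         return True
--     if node not in path:
--         return True
--     if node.islower():
--         # Only lowercase nodes count here
--         c = Counter([i for i in path if i.islower()])
--         if c.get(node) == 1:
--             # This node is visited. Is there some node visited twice?
--             if 2 in c.values():
--                 # Yes, there is. So this can not be entered twice
--                 return False
--             else:
--                 # No there aren't. So this can be entered twice
--                 return True
--         else:
--             # node is visited more than once - can't enter
--             # zero can't happened here, it is checked above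
--             return False
--     else:
--         # Upper case node can be visited multiple times
--         return True
-- ===== SOURCE B (Python) =====
-- def part2(node, path):
--     if node == 'start':
--         return False
--     if node == 'end' or not node.islower():
--         return True
--     # sort the small caves: equal caves become adjacent, so one pass over the
--     # runs yields node's visit count and whether any small cave was doubled
--     sp = sorted(x for x in path if x.islower())
--     cnt = 0
--     doubled = False
--     i = 0
--     n = len(sp)
--     while i < n:
--         j = i + 1
--         while j < n and sp[j] == sp[i]:
--             j += 1
--         if sp[i] == node:
--             cnt = j - i
--         if j - i == 2:
--             doubled = True
--         i = j
--     return cnt == 0 or (cnt == 1 and not doubled)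
-- ===== Notes on version B (the rewrite author's own statement) =====
-- stated objective: alternative
-- what changed: B drops A's membership guard and Counter entirely: it sorts the small caves of the path and a single run-length scan over the sorted list yields the node's visit count and whether any small cave is doubled, which one boolean expression combines.
import Mathlib
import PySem

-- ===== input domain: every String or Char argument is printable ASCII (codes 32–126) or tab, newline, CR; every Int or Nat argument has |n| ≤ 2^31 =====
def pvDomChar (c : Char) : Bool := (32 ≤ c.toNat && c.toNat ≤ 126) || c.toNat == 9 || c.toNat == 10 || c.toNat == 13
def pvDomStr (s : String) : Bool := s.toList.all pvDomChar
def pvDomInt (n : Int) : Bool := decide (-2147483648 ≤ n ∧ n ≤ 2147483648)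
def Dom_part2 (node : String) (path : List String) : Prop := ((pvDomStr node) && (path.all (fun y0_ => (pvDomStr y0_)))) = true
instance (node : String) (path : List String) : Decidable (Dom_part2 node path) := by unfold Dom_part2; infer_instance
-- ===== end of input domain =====

-- B replaces A's membership guard + Counter + values inspection by sorting the small caves
-- and a single run-length scan over the sorted list (objective: alternative).

-- shared primitive: Python str.islower() — at least one cased char, and no uppercase cased char;
-- exact on the ASCII domain (Dom_part2), where the cased characters are exactly A–Z and a–z.
def pvStrIslower (s : String) : Bool :=
  s.toList.any PySem.Chars.islower && s.toList.all (fun c => !PySem.Chars.isupper c)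

-- ===== PORT A =====
def part2 (node : String) (path : List String) : Bool :=
  if node == "start" then false
  else if node == "end" then true
  else if !(path.contains node) then true
  else if pvStrIslower node then
    let c := PySem.Dict.counter (path.filter (fun i => pvStrIslower i))
    if c.get? node == some 1 then
      if (c.values).contains (2 : Int) then false
      else true
    else false
  else true

-- ===== PORT B =====
-- Source B's run-peeling loop: each step consumes one run of equal adjacent elements of the sorted list
def scanRuns (node : String) (sp : List String) : Int × Bool :=
  match sp with
  | [] => (0, false)
  | h :: t =>
    let run := (t.takeWhile (fun x => x == h)).length + 1
    let r := scanRuns node (t.dropWhile (fun x => x == h))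
    (if h == node then (run : Int) else r.1, r.2 || (run == 2))
termination_by sp.length
decreasing_by
  simp only [List.length_cons]
  exact Nat.lt_succ_of_le (List.length_dropWhile_le _ _)

def part2_alt (node : String) (path : List String) : Bool :=
  if node == "start" then false
  else if node == "end" || !(pvStrIslower node) then true
  else
    let r := scanRuns node (PySem.List.sorted (path.filter (fun x => pvStrIslower x)) (fun x => x) false)
    (r.1 == 0) || ((r.1 == 1) && !r.2)

-- ===== PRECONDITION & SPEC =====
def Spec_part2 (node : String) (path : List String) (out : Bool) : Prop := out = part2_alt node path
instance (node : String) (path : List String) (out : Bool) : Decidable (Spec_part2 node path out) := by unfold Spec_part2; infer_instance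

-- ===== CLAIM =====
def Claim_equal_part2 : Prop := ∀ (node : String) (path : List String), Dom_part2 node path → Spec_part2 node path (part2 node path)

-- ===== LEMMAS AND PROOFS =====

-- the counter's entry for an element of xs is its count in xs
theorem counter_get?_mem (xs : List String) (v : String) (h : v ∈ xs) :
    (PySem.Dict.counter xs).get? v = some ((xs.count v : Int)) := by
  rw [PySem.Dict.get?_eq_some_iff_mem_items _ _ _ (PySem.Dict.nodup_keys_counter xs),
      PySem.Dict.items_counter]
  exact List.mem_map.mpr ⟨v, (PySem.Set.mem_ofList xs v).mpr h, rfl⟩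

-- a value sits in the counter's values iff it is the count of some element of xs
theorem counter_values_mem (xs : List String) (w : Int) :
    w ∈ (PySem.Dict.counter xs).values ↔ ∃ k ∈ xs, (xs.count k : Int) = w := by
  show w ∈ (PySem.Dict.counter xs).items.map (·.2) ↔ _
  rw [PySem.Dict.items_counter]
  simp [List.mem_map, PySem.Set.mem_ofList]

-- on a ≤-sorted list the run scan returns (count of node, ∃ element with count exactly 2)
theorem scanRuns_spec (node : String) (sp : List String)
    (hs : sp.Pairwise (fun a b => a ≤ b)) :
    (scanRuns node sp).1 = (sp.count node : Int) ∧
    ((scanRuns node sp).2 = true ↔ ∃ k ∈ sp, sp.count k = 2) := by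
  induction sp using scanRuns.induct node with
  | case1 => simp [scanRuns]
  | case2 h t ih =>
    rcases List.pairwise_cons.mp hs with ⟨hle, ht⟩
    set w := t.takeWhile (fun x => x == h) with hw
    set d := t.dropWhile (fun x => x == h) with hd
    have htwd : t = w ++ d := (List.takeWhile_append_dropWhile).symm
    have hwall : ∀ x ∈ w, x = h := by
      intro x hx
      have := List.mem_takeWhile_imp hx
      simpa using this
    have hdp : d.Pairwise (fun a b => a ≤ b) := by
      rw [htwd] at ht; exact (List.pairwise_append.mp ht).2.1
    have hdlt : ∀ x ∈ d, h < x := by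
      rcases hdd : d with _ | ⟨d0, d'⟩
      · intro x hx; cases hx
      · have hfind : t.find? (fun x => !(x == h)) = some d0 := by
          rw [List.find?_not_eq_head?_dropWhile, ← hd, hdd]; rfl
        have hd0ne : d0 ≠ h := by
          have := List.find?_some hfind; simpa using this
        have hhd0 : h < d0 :=
          lt_of_le_of_ne (hle d0 (by rw [htwd, hdd]; simp)) (Ne.symm hd0ne)
        have hdp' : (d0 :: d').Pairwise (fun a b => a ≤ b) := by rw [← hdd]; exact hdp
        intro x hx
        rcases List.mem_cons.mp hx with rfl | hx'
        · exact hhd0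
        · exact lt_of_lt_of_le hhd0 ((List.pairwise_cons.mp hdp').1 x hx')
    have hhd : h ∉ d := fun hmem => lt_irrefl h (hdlt h hmem)
    obtain ⟨ih1, ih2⟩ := ih hdp
    have hcw : ∀ k, k ≠ h → w.count k = 0 := by
      intro k hk
      rw [List.count_eq_zero]
      intro hkw; exact hk (hwall k hkw)
    have hcwh : w.count h = w.length := by
      rw [List.count_eq_length]; intro x hx; exact ((hwall x hx) ▸ rfl)
    have hch : (h :: t).count h = w.length + 1 := by
      rw [htwd]
      simp [List.count_append, hcwh, List.count_eq_zero.mpr hhd]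
    have hck : ∀ k, k ≠ h → (h :: t).count k = d.count k := by
      intro k hk
      rw [htwd]
      simp [List.count_append, hcw k hk, Ne.symm hk]
    have hunf : scanRuns node (h :: t) =
        (if h == node then ((w.length + 1 : Nat) : Int) else (scanRuns node d).1,
         (scanRuns node d).2 || (w.length + 1 == 2)) := by
      rw [scanRuns]
    rw [hunf]
    constructor
    · show (if (h == node) = true then ((w.length + 1 : Nat) : Int) else (scanRuns node d).1) = _
      by_cases hnh : node = h
      · subst hnh; rw [if_pos (by simp), hch]
      · rw [if_neg (by simpa using Ne.symm hnh), ih1, hck node hnh]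
    · show ((scanRuns node d).2 || (w.length + 1 == 2)) = true ↔ _
      rw [Bool.or_eq_true, ih2, beq_iff_eq]
      constructor
      · rintro (⟨k, hk, hck2⟩ | hrun)
        · refine ⟨k, by rw [htwd]; simp [hk], ?_⟩
          rw [hck k (fun he => hhd (he ▸ hk)), hck2]
        · exact ⟨h, List.mem_cons_self, by rw [hch, hrun]⟩
      · rintro ⟨k, hk, hk2⟩
        by_cases hkh : k = h
        · right; subst hkh; rw [hch] at hk2; exact hk2
        · left
          refine ⟨k, ?_, by rw [← hck k hkh]; exact hk2⟩
          rcases List.mem_cons.mp hk with rfl | hkt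
          · exact absurd rfl hkh
          · rw [htwd] at hkt
            rcases List.mem_append.mp hkt with hkw | hkd
            · exact absurd (hwall k hkw) hkh
            · exact hkd

-- ===== VERDICT =====
theorem part2_spec : Claim_equal_part2 := by
  intro node path _
  unfold Spec_part2 part2 part2_alt
  by_cases h1 : (node == "start") = true
  · rw [if_pos h1, if_pos h1]
  rw [if_neg h1, if_neg h1]
  by_cases h2 : (node == "end") = true
  · rw [if_pos h2, if_pos (show ((node == "end") || !pvStrIslower node) = true by simp [h2])]
  rw [if_neg h2]
  by_cases h4 : pvStrIslower node = true
  · -- lowercase node: B runs the sorted scan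
    rw [if_neg (show ¬(((node == "end") || !pvStrIslower node) = true) by simp [h2, h4])]
    set L := path.filter (fun i => pvStrIslower i) with hL
    set S := PySem.List.sorted L (fun x => x) false with hS
    have hperm : S.Perm L := PySem.List.sorted_perm L (fun x => x) false
    have hpw : S.Pairwise (fun a b => a ≤ b) := PySem.List.sorted_pairwise L (fun x => x)
    obtain ⟨hc1, hc2⟩ := scanRuns_spec node S hpw
    have hcount : S.count node = path.count node := by
      rw [hperm.count_eq, hL, List.count_filter h4]
    by_cases h3 : (path.contains node) = true
    · -- node already in path
      rw [if_neg (show ¬((!path.contains node) = true) by simpa using h3), if_pos h4]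
      have hmem : node ∈ path := by simpa using h3
      have hget : (PySem.Dict.counter L).get? node = some ((path.count node : Int)) := by
        rw [counter_get?_mem L node (List.mem_filter.mpr ⟨hmem, h4⟩), hL,
            List.count_filter h4]
      have hvals : (PySem.Dict.counter L).values.contains (2 : Int)
          = (scanRuns node S).2 := by
        rcases hb : (scanRuns node S).2 with _ | _
        · apply Bool.eq_false_iff.mpr
          intro hcont
          rw [List.contains_eq_mem, decide_eq_true_iff, counter_values_mem] at hcont
          rcases hcont with ⟨k, hk, hk2⟩
          have hx : ∃ k ∈ S, S.count k = 2 := by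
            refine ⟨k, hperm.mem_iff.mpr hk, ?_⟩
            rw [hperm.count_eq]; exact_mod_cast hk2
          rw [← hc2, hb] at hx; cases hx
        · rcases hc2.mp hb with ⟨k, hk, hk2⟩
          rw [List.contains_eq_mem, decide_eq_true_eq, counter_values_mem]
          refine ⟨k, hperm.mem_iff.mp hk, ?_⟩
          rw [← hperm.count_eq, hk2]; rfl
      show (if (PySem.Dict.counter L).get? node == some 1 then
              (if (PySem.Dict.counter L).values.contains (2 : Int) then false else true)
            else false)
           = ((scanRuns node S).1 == 0 || ((scanRuns node S).1 == 1 && !(scanRuns node S).2))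
      rw [hget, hvals, hc1, hcount]
      have hpos : 0 < path.count node := List.count_pos_iff.mpr hmem
      by_cases h5 : path.count node = 1
      · rw [h5]
        rcases (scanRuns node S).2 with _ | _ <;> simp
      · rw [if_neg (show ¬((some ((List.count node path : Nat) : Int) == some 1) = true) by
          simp; exact_mod_cast h5)]
        have hz : ¬ ((((List.count node path : Nat) : Int) == 0) = true) := by simp; omega
        have ho : ¬ ((((List.count node path : Nat) : Int) == 1) = true) := by
          simp; exact_mod_cast h5
        simp [hz, ho]
    · -- node not in path: A's third guard fires; B's count is 0
      rw [if_pos (show (!path.contains node) = true by simpa using h3)]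
      have hc0 : path.count node = 0 := List.count_eq_zero.mpr (by simpa using h3)
      show _ = ((scanRuns node S).1 == 0 || _)
      rw [hc1, hcount, hc0]
      simp
  · -- not lowercase: B returns true; A returns true in both remaining branches
    rw [if_pos (show ((node == "end") || !pvStrIslower node) = true by simp [h4])]
    by_cases h3 : (!path.contains node) = true
    · rw [if_pos h3]
    · rw [if_neg h3, if_neg (show ¬(pvStrIslower node = true) by simpa using h4)]
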